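-- pv_equiv track=rewrite | github.com/rmscoal/algoDS | python/data_structure/strings.py | gatherAllSubstring
-- ===== SOURCE A (Python) =====
-- from typing import List
--
-- def gatherAllSubstring(s: str) -> List[str]:
--     n = len(s)
--     arr = []
--
--     for i in range(0, n, 1):
--         for j in range(i, n, 1):
--             substr = ""
--             for k in range(i, j+1):
--                 substr += s[k]
--             arr.append(substr)
--
--     return arr
-- ===== SOURCE B (Python) =====
-- from typing import List
--
-- def gatherAllSubstring(s: str) -> List[str]:
--     arr = []
--     suffix = s
--     while suffix:
--         acc = ""
--         for ch in suffix:
--             acc += ch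
--             arr.append(acc)
--         suffix = suffix[1:]
--     return arr
-- ===== Notes on version B (the rewrite author's own statement) =====
-- stated objective: faster
-- what changed: Instead of three nested index loops that rebuild every substring character by character from scratch, B walks the suffixes of s with a while loop and, for each suffix, grows a single running-prefix accumulator in one pass, appending it after each extension.
import Mathlib
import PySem

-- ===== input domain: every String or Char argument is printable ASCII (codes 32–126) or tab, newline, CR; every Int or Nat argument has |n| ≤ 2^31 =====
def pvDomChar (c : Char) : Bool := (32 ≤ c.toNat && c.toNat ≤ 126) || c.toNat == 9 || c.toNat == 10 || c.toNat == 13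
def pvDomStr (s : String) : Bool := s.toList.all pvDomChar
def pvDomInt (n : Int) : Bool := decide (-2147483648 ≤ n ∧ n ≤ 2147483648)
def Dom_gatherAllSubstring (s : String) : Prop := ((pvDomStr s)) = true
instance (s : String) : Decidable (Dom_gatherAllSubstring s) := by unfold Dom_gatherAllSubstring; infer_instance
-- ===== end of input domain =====

-- B replaces A's three nested index loops (which rebuild every substring from scratch)
-- by a walk over the suffixes of s that extends one running-prefix accumulator; faster (fewer character copies).


-- ===== PORT A =====
-- literal transliteration: n = len(s); for i in range(0,n,1): for j in range(i,n,1):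
--   substr = ""; for k in range(i,j+1): substr += s[k];  arr.append(substr)
-- (s[k] is always in range, so pyGetD's default is never used)
def gatherAllSubstring (s : String) : List String :=
  let cs := s.toList
  let n : Int := PySem.List.len cs
  let arr : List String := []
  (PySem.List.pyRange 0 n 1).foldl (fun arr i =>
    (PySem.List.pyRange i n 1).foldl (fun arr j =>
      let substr : List Char :=
        (PySem.List.pyRange i (j + 1) 1).foldl
          (fun substr k => substr ++ [PySem.List.pyGetD cs k ' ']) []
      arr ++ [String.ofList substr]) arr) arr

-- ===== PORT B =====
-- inner for-loop of Source B: for ch in suffix: acc += ch; arr.append(acc)   (state = (arr, acc))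
def altInner (l : List Char) (st : List String × List Char) : List String × List Char :=
  l.foldl (fun st ch => (st.1 ++ [String.ofList (st.2 ++ [ch])], st.2 ++ [ch])) st

-- while suffix: … ; suffix = suffix[1:]
def altGo : List Char → List String → List String
  | [], arr => arr
  | c :: rest, arr => altGo rest (altInner (c :: rest) (arr, [])).1

def gatherAllSubstring_alt (s : String) : List String := altGo s.toList []

-- ===== PRECONDITION & SPEC =====
def Spec_gatherAllSubstring (s : String) (out : List String) : Prop := out = gatherAllSubstring_alt s
instance (s : String) (out : List String) : Decidable (Spec_gatherAllSubstring s out) := by unfold Spec_gatherAllSubstring; infer_instance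

-- ===== CLAIM (what is proved, stated in full; the proofs are below) =====
def Claim_equal_gatherAllSubstring : Prop := ∀ (s : String), Dom_gatherAllSubstring s → Spec_gatherAllSubstring s (gatherAllSubstring s)

-- ===== LEMMAS AND PROOFS =====

-- the common value both programs compute: for every start index i, the nonempty prefixes of cs.drop i
def neP (l : List Char) : List String := l.inits.tail.map String.ofList

def specS (cs : List Char) : List String :=
  (List.range cs.length).flatMap (fun i => neP (cs.drop i))

theorem inits_head_tail (l : List Char) : l.inits = [] :: l.inits.tail := by
  cases l <;> simp

theorem range_map_take_succ (l : List Char) :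
    (List.range l.length).map (fun t => l.take (t + 1)) = l.inits.tail := by
  induction l with
  | nil => simp
  | cons a rest ih =>
    rw [List.length_cons, List.range_succ_eq_map, List.map_cons, List.map_map,
      List.inits_cons, List.tail_cons, inits_head_tail rest, List.map_cons, ← ih,
      List.map_map]
    simp [Function.comp_def]

theorem foldP (l : List Char) (out : List String) (acc : List Char) :
    (altInner l (out, acc)).1 = out ++ l.inits.tail.map (fun p => String.ofList (acc ++ p)) := by
  induction l generalizing out acc with
  | nil => simp [altInner]
  | cons c rest ih =>
    simp only [altInner, List.foldl_cons] at *
    rw [ih, List.inits_cons, List.tail_cons, inits_head_tail rest]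
    simp [Function.comp_def, List.append_assoc]

theorem altInner_eq (l : List Char) (out : List String) :
    (altInner l (out, [])).1 = out ++ neP l := by
  simp [foldP, neP]

theorem altGo_eq (cs : List Char) (arr : List String) :
    altGo cs arr = arr ++ specS cs := by
  induction cs generalizing arr with
  | nil => simp [altGo, specS]
  | cons c rest ih =>
    rw [altGo, ih, altInner_eq]
    simp only [specS, List.length_cons, List.range_succ_eq_map, List.flatMap_cons,
      List.flatMap_map, List.drop_zero, List.append_assoc]
    rfl

-- A's inner k-loop builds exactly the characters cs[i..j]
theorem buildA_eq (cs : List Char) (i j : Nat) (hj : j < cs.length) (hij : i ≤ j) :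
    (PySem.List.pyRange (i : Int) ((j : Int) + 1) 1).foldl
      (fun substr k => substr ++ [PySem.List.pyGetD cs k ' ']) []
      = (cs.drop i).take (j + 1 - i) := by
  rw [PySem.List.foldl_append_singleton_eq_map, PySem.List.pyRange_one]
  have hlen : ((j : Int) + 1) - (i : Int) = ((j + 1 - i : Nat) : Int) := by omega
  rw [hlen, Int.toNat_natCast]
  simp only [List.nil_append, List.map_map]
  apply List.ext_getElem
  · simp; omega
  · intro t h1 h2
    simp only [List.getElem_map, List.getElem_range, Function.comp]
    have ht : t < j + 1 - i := by simpa using h1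
    have hc : (i : Int) + (t : Int) = ((i + t : Nat) : Int) := by push_cast; ring
    rw [hc, PySem.List.pyGetD_natCast]
    rw [List.getElem_take, List.getElem_drop]
    have hlt : i + t < cs.length := by omega
    simp [List.getD_eq_getElem?_getD, List.getElem?_eq_getElem hlt]

-- A's j-loop for start index i produces the nonempty prefixes of cs.drop i
theorem rowA_eq (cs : List Char) (i : Nat) (hi : i ≤ cs.length) :
    (PySem.List.pyRange (i : Int) ((cs.length : Int)) 1).map (fun j => String.ofList
      ((PySem.List.pyRange (i : Int) (j + 1) 1).foldl
        (fun substr k => substr ++ [PySem.List.pyGetD cs k ' ']) []))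
      = neP (cs.drop i) := by
  unfold neP
  rw [← range_map_take_succ (cs.drop i), PySem.List.pyRange_one]
  have hlen : ((cs.length : Int)) - (i : Int) = ((cs.length - i : Nat) : Int) := by omega
  rw [hlen, Int.toNat_natCast, List.map_map, List.map_map]
  apply List.ext_getElem
  · simp
  · intro t h1 h2
    have ht : t < cs.length - i := by simpa using h1
    simp only [List.getElem_map, List.getElem_range, Function.comp]
    have hc : (i : Int) + (t : Int) = ((i + t : Nat) : Int) := by push_cast; ring
    rw [hc, buildA_eq cs i (i + t) (by omega) (by omega)]
    have harith : i + t + 1 - i = t + 1 := by omega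
    rw [harith]

theorem gatherA_eq (s : String) : gatherAllSubstring s = specS s.toList := by
  unfold gatherAllSubstring
  simp only [PySem.List.len_eq]
  have hfun : (fun (arr : List String) (i : Int) =>
      (PySem.List.pyRange i (s.toList.length : Int) 1).foldl (fun arr j =>
        arr ++ [String.ofList ((PySem.List.pyRange i (j + 1) 1).foldl
          (fun substr k => substr ++ [PySem.List.pyGetD s.toList k ' ']) [])]) arr)
      = fun (arr : List String) (i : Int) =>
        arr ++ (PySem.List.pyRange i (s.toList.length : Int) 1).map (fun j =>
          String.ofList ((PySem.List.pyRange i (j + 1) 1).foldl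
            (fun substr k => substr ++ [PySem.List.pyGetD s.toList k ' ']) [])) := by
    funext arr i
    rw [PySem.List.foldl_append_singleton_eq_map]
  rw [hfun, PySem.List.foldl_append_eq_flatMap, List.nil_append,
    PySem.List.pyRange_zero_natCast, List.flatMap_map]
  unfold specS
  refine List.flatMap_congr ?_
  intro i hi
  exact rowA_eq s.toList i (le_of_lt (List.mem_range.mp hi))

-- ===== VERDICT (by name: the statement is the Claim_ definition above) =====
theorem gatherAllSubstring_spec : Claim_equal_gatherAllSubstring := by
  intro s _
  unfold Spec_gatherAllSubstring gatherAllSubstring_alt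
  rw [gatherA_eq, altGo_eq]
  simp
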